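-- pv_equiv track=rewrite | github.com/joelsebbu/chess_analytics | functions.py | generate_batch_ranges_and_files
-- ===== SOURCE A (Python) =====
-- def generate_batch_ranges_and_files(total_games, batch_size):
--     full_batches = total_games // batch_size
--     remaining = total_games % batch_size
--
--     ranges_and_files = []
--     for i in range(full_batches):
--         start = i * batch_size
--         end = start + batch_size - 1
--         file_name = f"games_{start}-{end}.csv"
--         ranges_and_files.append(([start, end], file_name))
--
--     if remaining > 0:
--         start = full_batches * batch_size
--         end = total_games - 1
--         file_name = f"games_{start}-{end}.csv"
--         ranges_and_files.append(([start, end], file_name))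
--
--     return ranges_and_files
-- ===== SOURCE B (Python) =====
-- def generate_batch_ranges_and_files(total_games, batch_size):
--     boundaries = list(range(0, total_games, batch_size)) + [total_games]
--     return [([start, stop - 1], f"games_{start}-{stop - 1}.csv")
--             for start, stop in zip(boundaries, boundaries[1:])]
-- ===== Notes on version B (the rewrite author's own statement) =====
-- stated objective: simpler
-- what changed: Instead of counting full batches with // and % and appending a special remainder batch, B first builds the list of batch boundary points (the starts plus total_games) and then zips adjacent boundaries into ranges, so no division, no min and no remainder branch exist at all.
-- outside the precondition, e.g. on generate_batch_ranges_and_files(0, 0): A raises ZeroDivisionError, B raises ValueError; on generate_batch_ranges_and_files(-10, 3): A returns [([-12, -11], 'games_-12--11.csv')], B returns []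
import Mathlib
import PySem

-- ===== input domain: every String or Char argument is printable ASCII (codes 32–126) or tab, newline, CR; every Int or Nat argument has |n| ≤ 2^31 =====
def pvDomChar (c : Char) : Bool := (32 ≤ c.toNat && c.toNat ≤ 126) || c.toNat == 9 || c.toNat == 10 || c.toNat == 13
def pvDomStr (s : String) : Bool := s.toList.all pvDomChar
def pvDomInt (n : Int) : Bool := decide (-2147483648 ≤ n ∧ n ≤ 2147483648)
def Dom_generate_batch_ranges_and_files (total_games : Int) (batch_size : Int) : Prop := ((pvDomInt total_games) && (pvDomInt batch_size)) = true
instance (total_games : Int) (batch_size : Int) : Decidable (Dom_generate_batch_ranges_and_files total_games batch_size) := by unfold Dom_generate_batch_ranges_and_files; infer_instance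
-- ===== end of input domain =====

-- B replaces A's //-and-% batch counting plus special remainder branch by building the list of
-- batch boundary points and zipping adjacent boundaries into ranges (simpler decomposition).


-- ===== PORT A =====
def generate_batch_ranges_and_files (total_games : Int) (batch_size : Int) : List (List Int × String) :=
  let full_batches := PySem.Int.floordiv total_games batch_size
  let remaining := PySem.Int.mod total_games batch_size
  let ranges_and_files : List (List Int × String) := []
  let ranges_and_files := (PySem.List.pyRange 0 full_batches 1).foldl
    (fun acc i =>
      let start := i * batch_size
      let «end» := start + batch_size - 1
      let file_name := "games_" ++ PySem.Int.toStr start ++ "-" ++ PySem.Int.toStr «end» ++ ".csv"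
      acc ++ [([start, «end»], file_name)]) ranges_and_files
  if remaining > 0 then
    let start := full_batches * batch_size
    let «end» := total_games - 1
    let file_name := "games_" ++ PySem.Int.toStr start ++ "-" ++ PySem.Int.toStr «end» ++ ".csv"
    ranges_and_files ++ [([start, «end»], file_name)]
  else ranges_and_files

-- ===== PORT B =====
def generate_batch_ranges_and_files_alt (total_games : Int) (batch_size : Int) : List (List Int × String) :=
  let boundaries := PySem.List.pyRange 0 total_games batch_size ++ [total_games]
  (boundaries.zip (PySem.List.slice boundaries (some 1) none)).map
    (fun p =>
      ([p.1, p.2 - 1], "games_" ++ PySem.Int.toStr p.1 ++ "-" ++ PySem.Int.toStr (p.2 - 1) ++ ".csv"))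

-- ===== PRECONDITION & SPEC =====
-- Pre_ excludes batch_size = 0, where A raises ZeroDivisionError, and negative total_games,
-- which lie outside the natural domain of a game counter: there A's floor-division loop emits
-- accidental negative index ranges no caller would specify.
def Pre_generate_batch_ranges_and_files (total_games : Int) (batch_size : Int) : Prop :=
  0 ≤ total_games ∧ batch_size ≠ 0
instance (total_games : Int) (batch_size : Int) : Decidable (Pre_generate_batch_ranges_and_files total_games batch_size) := by unfold Pre_generate_batch_ranges_and_files; infer_instance
def pvWitness_generate_batch_ranges_and_files : Int × Int := (7, 3)
def Spec_generate_batch_ranges_and_files (total_games : Int) (batch_size : Int) (out : List (List Int × String)) : Prop := out = generate_batch_ranges_and_files_alt total_games batch_size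
instance (total_games : Int) (batch_size : Int) (out : List (List Int × String)) : Decidable (Spec_generate_batch_ranges_and_files total_games batch_size out) := by unfold Spec_generate_batch_ranges_and_files; infer_instance

-- ===== CLAIM (what is proved, stated in full; the proofs are below) =====
def Claim_equal_generate_batch_ranges_and_files : Prop := ∀ (total_games : Int) (batch_size : Int), Dom_generate_batch_ranges_and_files total_games batch_size → Pre_generate_batch_ranges_and_files total_games batch_size → Spec_generate_batch_ranges_and_files total_games batch_size (generate_batch_ranges_and_files total_games batch_size)

-- ===== LEMMAS AND PROOFS =====

-- the zip of the boundary list with its tail, as an explicit map over batch indices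
lemma pv_zip_tail_eq {beta : Type} (bs t : Int) (n : Nat) (g : Int × Int → beta) :
    List.map g (((List.range n).map (fun (k : Nat) => bs * (k:Int)) ++ [t]).zip
      (((List.range n).map (fun (k : Nat) => bs * (k:Int)) ++ [t]).tail))
    = (List.range n).map (fun (k : Nat) => g (bs * (k:Int), if k + 1 < n then bs * ((k:Int) + 1) else t)) := by
  apply List.ext_getElem
  · simp
  · intro i h1 h2
    have hi : i < n := by simpa using h2
    simp only [List.getElem_map, List.getElem_zip, List.getElem_tail, List.getElem_range]
    congr 1
    have hb1 : ((List.range n).map (fun (k : Nat) => bs * (k:Int)) ++ [t])[i]'(by simp; omega)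
        = bs * (i:Int) := by
      rw [List.getElem_append_left (by simpa using hi)]
      simp
    have hb2 : ((List.range n).map (fun (k : Nat) => bs * (k:Int)) ++ [t])[i+1]'(by simp; omega)
        = if i + 1 < n then bs * ((i:Int) + 1) else t := by
      by_cases h : i + 1 < n
      · rw [List.getElem_append_left (by simpa using h)]
        simp [h]
      · have hin : i + 1 = n := by omega
        rw [List.getElem_append_right (by simpa using hin.ge)]
        simp [hin]
    rw [hb1, hb2]

-- one full batch written A's way equals written B's way
lemma pv_elem_eq (bs : Int) (k : Nat) (c : Int) (hc : c = bs * ((k:Int) + 1)) :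
    ((([(k:Int) * bs, (k:Int) * bs + bs - 1] : List Int),
      "games_" ++ PySem.Int.toStr ((k:Int) * bs) ++ "-" ++ PySem.Int.toStr ((k:Int) * bs + bs - 1) ++ ".csv") : List Int × String)
    = (([bs * (k:Int), c - 1] : List Int),
      "games_" ++ PySem.Int.toStr (bs * (k:Int)) ++ "-" ++ PySem.Int.toStr (c - 1) ++ ".csv") := by
  subst hc
  rw [show ((k:Int) * bs + bs - 1) = bs * ((k:Int) + 1) - 1 by ring, mul_comm ((k:Int)) bs]

-- step < 0 and 0 ≤ b: Python's range(0, b, step) is empty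
lemma pv_pyRange_neg_nil (b s : Int) (hb : 0 ≤ b) (hs : s < 0) : PySem.List.pyRange 0 b s = [] := by
  unfold PySem.List.pyRange
  simp [show ¬ s = 0 by omega, show ¬ 0 < s by omega, show ¬ b < 0 by omega]

-- ===== VERDICT (by name: the statement is the Claim_ definition above) =====
theorem generate_batch_ranges_and_files_spec : Claim_equal_generate_batch_ranges_and_files := by
  intro t bs _ hpre
  obtain ⟨ht, hbs⟩ := hpre
  unfold Spec_generate_batch_ranges_and_files
  simp only [generate_batch_ranges_and_files, generate_batch_ranges_and_files_alt]
  rcases lt_or_gt_of_ne hbs with hneg | hpos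
  · -- batch_size < 0 : both sides are []
    have hmod := PySem.Int.mod_neg_bounds t hneg
    have hfb : PySem.Int.floordiv t bs ≤ 0 := by
      have h := PySem.Int.floordiv_mul_add_mod t bs
      nlinarith [hmod.1, hmod.2]
    rw [pv_pyRange_neg_nil t bs ht hneg, PySem.List.pyRange_one_eq_nil hfb]
    simp [show ¬ PySem.Int.mod t bs > 0 by omega, PySem.List.slice_from_one]
  · -- batch_size > 0 : main case
    set q := PySem.Int.floordiv t bs with hq
    set r := PySem.Int.mod t bs with hr
    have hqr : q * bs + r = t := PySem.Int.floordiv_mul_add_mod t bs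
    have hr0 : 0 ≤ r := PySem.Int.mod_nonneg t hpos
    have hrlt : r < bs := PySem.Int.mod_lt t hpos
    have hq0 : 0 ≤ q := by nlinarith
    rw [PySem.List.foldl_append_singleton_eq_map, List.nil_append,
        PySem.List.pyRange_one, PySem.List.slice_from_one,
        PySem.List.pyRange_of_pos 0 t hpos]
    have hn : (if (0:Int) < t then ((t - 0 + bs - 1) / bs).toNat else 0)
        = q.toNat + (if 0 < r then 1 else 0) := by
      by_cases h0 : (0:Int) < t
      · rw [if_pos h0]
        have hdiv : (t - 0 + bs - 1) / bs = q + (if 0 < r then 1 else 0) := by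
          rw [← PySem.Int.floordiv_eq_ediv_of_pos hpos,
              PySem.Int.floordiv_eq_iff_of_pos hpos]
          split_ifs with hrp <;> constructor <;> nlinarith
        rw [hdiv]
        split_ifs <;> omega
      · have ht0 : t = 0 := by omega
        have hq' : q = 0 := by nlinarith
        have hr' : r = 0 := by nlinarith
        rw [if_neg h0, hq', if_neg (show ¬ (0:Int) < r by omega)]
        simp
    rw [hn]
    simp only [zero_add, sub_zero, List.map_map]
    rw [pv_zip_tail_eq]
    by_cases hrp : 0 < r
    · simp only [if_pos hrp, List.range_succ, List.map_append]
      congr 1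
      · apply List.map_congr_left
        intro k hk
        have hklt : k < q.toNat := List.mem_range.mp hk
        simp only [Function.comp_apply, if_pos (show k + 1 < q.toNat + 1 by omega)]
        exact pv_elem_eq bs k _ rfl
      · simp only [List.map_cons, List.map_nil, if_neg (show ¬ q.toNat + 1 < q.toNat + 1 by omega)]
        rw [Int.toNat_of_nonneg hq0, mul_comm bs q]
    · simp only [if_neg hrp, Nat.add_zero]
      apply List.map_congr_left
      intro k hk
      have hklt : k < q.toNat := List.mem_range.mp hk
      simp only [Function.comp_apply]
      have hcond : (if k + 1 < q.toNat then bs * ((k:Int) + 1) else t) = bs * ((k:Int) + 1) := by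
        split_ifs with h
        · rfl
        · have hqk : q = (k:Int) + 1 := by omega
          have hr' : r = 0 := by omega
          rw [← hqr, hr', hqk]
          ring
      rw [hcond]
      exact pv_elem_eq bs k _ rfl
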